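-- pv_equiv track=rewrite | github.com/epam/dial-mind-map-backend | general_mindmap/utils/rag_eval_utils.py | encode_url_characters
-- ===== SOURCE A (Python) =====
-- def encode_url_characters(url: str) -> str:
--     mapping = {
--         "[": "%5B",
--         "]": "%5D",
--     }
--     for char, replacement in mapping.items():
--         url = url.replace(char, replacement)
--     return url
-- ===== SOURCE B (Python) =====
-- def encode_url_characters(url: str) -> str:
--     out = []
--     for c in url:
--         if c == "[":
--             out.append("%5B")
--         elif c == "]":
--             out.append("%5D")
--         else:
--             out.append(c)
--     return "".join(out)
-- ===== Notes on version B (the rewrite author's own statement) =====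
-- stated objective: alternative
-- what changed: A rewrites the whole string once per mapping entry (two full .replace passes, no explicit loop); B drops the mapping dict entirely and does a single explicit character loop with an if/elif chain, accumulating pieces in a list joined once at the end.
import Mathlib
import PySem

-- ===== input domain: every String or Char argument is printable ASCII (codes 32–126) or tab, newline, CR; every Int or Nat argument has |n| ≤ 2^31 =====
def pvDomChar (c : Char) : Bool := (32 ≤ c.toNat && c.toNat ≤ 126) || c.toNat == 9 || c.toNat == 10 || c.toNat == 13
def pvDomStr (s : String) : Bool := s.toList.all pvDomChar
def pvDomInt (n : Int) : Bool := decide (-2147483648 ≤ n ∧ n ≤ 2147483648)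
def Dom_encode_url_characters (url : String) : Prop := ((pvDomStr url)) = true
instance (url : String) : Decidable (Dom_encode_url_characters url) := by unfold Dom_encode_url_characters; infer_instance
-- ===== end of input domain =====

-- B drops A's dict and its two full-string .replace passes for one explicit character loop with an if/elif chain (alternative decomposition); same return value everywhere.

-- ===== PORT A =====
-- A: build the {"[": "%5B", "]": "%5D"} dict, then one .replace pass over the whole string per item.
def encode_url_characters (url : String) : String :=
  let mapping : PySem.Dict String String :=
    (PySem.Dict.empty.insert "[" "%5B").insert "]" "%5D"
  mapping.items.foldl (fun u p => PySem.Str.replace u p.1 p.2) url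

-- ===== PORT B =====
-- B: explicit loop over the characters, if/elif chain appending the piece for each char, joined once at the end.
def encode_url_characters_alt (url : String) : String :=
  let out : List String :=
    url.toList.foldl
      (fun out c =>
        (if c = '[' then "%5B" else if c = ']' then "%5D" else String.ofList [c]) :: out)
      []
  PySem.Str.join "" out.reverse

-- ===== PRECONDITION & SPEC =====
def Spec_encode_url_characters (url : String) (out : String) : Prop := out = encode_url_characters_alt url
instance (url : String) (out : String) : Decidable (Spec_encode_url_characters url out) := by unfold Spec_encode_url_characters; infer_instance

-- ===== CLAIM (what is proved, stated in full; the proofs are below) =====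
def Claim_equal_encode_url_characters : Prop := ∀ (url : String), Dom_encode_url_characters url → Spec_encode_url_characters url (encode_url_characters url)

-- ===== LEMMAS AND PROOFS =====

-- replace with a single-character pattern is a per-character flatMap
theorem pv_go_single (c : Char) (new : List Char) :
    ∀ (l acc : List Char) (fuel : Nat), l.length ≤ fuel →
      PySem.Chars.replace.go [c] new fuel l acc
        = acc.reverse ++ l.flatMap (fun x => if x = c then new else [x]) := by
  intro l
  induction l with
  | nil =>
      intro acc fuel _
      cases fuel <;> simp [PySem.Chars.replace.go]
  | cons h t ih =>
      intro acc fuel hle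
      cases fuel with
      | zero => simp at hle
      | succ n =>
        by_cases hc : h = c
        · subst hc
          have : [h].isPrefixOf (h :: t) = true := by
            simp [List.isPrefixOf]
          simp only [PySem.Chars.replace.go, this, if_pos]
          rw [show List.drop (List.length [h]) (h :: t) = t from rfl]
          rw [ih (new.reverse ++ acc) n (by simpa using hle)]
          simp [List.flatMap_cons]
        · have : [c].isPrefixOf (h :: t) = false := by
            simp [List.isPrefixOf]; intro h'; exact absurd h'.symm hc
          simp only [PySem.Chars.replace.go]
          rw [if_neg (by simp [this])]
          rw [ih (h :: acc) n (by simpa using hle)]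
          simp [List.flatMap_cons, hc]

theorem pv_replace_single (c : Char) (new : List Char) (l : List Char) :
    PySem.Chars.replace l [c] new = l.flatMap (fun x => if x = c then new else [x]) := by
  have : PySem.Chars.replace l [c] new = PySem.Chars.replace.go [c] new l.length l [] := by
    simp [PySem.Chars.replace]
  rw [this, pv_go_single c new l [] l.length le_rfl]
  simp

theorem pv_join_nil (parts : List (List Char)) : PySem.Chars.join [] parts = parts.flatten := by
  induction parts with
  | nil => rfl
  | cons p ps ih =>
    simp [PySem.Chars.join, List.intercalate] at ih ⊢
    cases ps <;> simp_all [List.intersperse]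

-- B's reversed-accumulator loop is the reversed map of the piece function
theorem pv_foldl_rev {α β : Type} (f : α → β) :
    ∀ (l : List α) (acc : List β),
      l.foldl (fun out c => f c :: out) acc = (l.map f).reverse ++ acc := by
  intro l
  induction l with
  | nil => intro acc; simp
  | cons h t ih => intro acc; simp [List.foldl, ih]

-- ===== VERDICT (by name: the statement is the Claim_ definition above) =====
theorem encode_url_characters_spec : Claim_equal_encode_url_characters := by
  intro url _
  unfold Spec_encode_url_characters encode_url_characters encode_url_characters_alt
  apply String.ext
  rw [pv_foldl_rev]
  simp only [List.append_nil, List.reverse_reverse, PySem.Str.toList_join]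
  have hitems : ((PySem.Dict.empty.insert "[" "%5B").insert "]" "%5D" : PySem.Dict String String).items
      = [("[", "%5B"), ("]", "%5D")] := by decide
  rw [show (((PySem.Dict.empty.insert "[" "%5B").insert "]" "%5D" : PySem.Dict String String).items.foldl
        (fun u p => PySem.Str.replace u p.1 p.2) url)
      = PySem.Str.replace (PySem.Str.replace url "[" "%5B") "]" "%5D" by rw [hitems]; rfl]
  simp only [PySem.Str.toList_replace]
  rw [show ("[" : String).toList = ['['] from rfl, show ("]" : String).toList = [']'] from rfl]
  rw [pv_replace_single, pv_replace_single]
  rw [List.flatMap_assoc]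
  rw [show ("" : String).toList = ([] : List Char) from rfl, pv_join_nil]
  rw [List.flatten_eq_flatMap, List.flatMap_map, List.flatMap_map]
  apply List.flatMap_congr
  intro x _
  by_cases h1 : x = '['
  · subst h1; decide
  by_cases h2 : x = ']'
  · subst h2; decide
  · simp [h1, h2]
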